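-- pv_equiv track=rewrite | github.com/rlagusgh0223/Algorithm | 221120/14890, 경사로.py | go
-- ===== SOURCE A (Python) =====
-- def go(a, l):
--     n = len(a)
--     c = [False] * n
--     for i in range(1, n):
--         if a[i-1] != a[i]:
--             diff = abs(a[i-1] - a[i])
--             if diff != 1:
--                 return False
--             if a[i-1] < a[i]:
--                 for j in range(1, l+1):
--                     if i-j < 0:
--                         return False
--                     if a[i-1] != a[i-j]:
--                         return False
--                     if c[i-j]:
--                         return False
--                     c[i-j] = True
--             else:
--                 for j in range(l):
--                     if i+j >= n:
--                         return False
--                     if a[i] != a[i+j]: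
--                         return False
--                     if c[i+j]:
--                         return False
--                     c[i+j] = True
--     return True
-- ===== SOURCE B (Python) =====
-- def go(a, l):
--     # One pass over adjacent pairs with a single counter (no per-transition rescans):
--     # `run` = cells of the current flat run still available (negative = cells a
--     # previous downhill ramp still owes).
--     if not a:
--         return True
--     run = 1
--     prev = a[0]
--     for x in a[1:]:
--         if x - prev == 0:
--             run += 1
--         elif x - prev == 1:
--             if run < l:
--                 return False
--             run = 1
--         elif x - prev == -1:
--             if run < 0:
--                 return False
--             run = 1 - l
--         else:
--             return False
--         prev = x
--     return run >= 0
-- ===== Notes on version B (the rewrite author's own statement) =====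
-- stated objective: simpler
-- what changed: A rescans and marks l cells in a shared boolean array at every height transition; B makes a single pass over adjacent pairs keeping one integer counter of still-available flat cells (negative = cells a downhill ramp still owes), so the inner rescan loops and the mark array disappear.
import Mathlib
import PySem

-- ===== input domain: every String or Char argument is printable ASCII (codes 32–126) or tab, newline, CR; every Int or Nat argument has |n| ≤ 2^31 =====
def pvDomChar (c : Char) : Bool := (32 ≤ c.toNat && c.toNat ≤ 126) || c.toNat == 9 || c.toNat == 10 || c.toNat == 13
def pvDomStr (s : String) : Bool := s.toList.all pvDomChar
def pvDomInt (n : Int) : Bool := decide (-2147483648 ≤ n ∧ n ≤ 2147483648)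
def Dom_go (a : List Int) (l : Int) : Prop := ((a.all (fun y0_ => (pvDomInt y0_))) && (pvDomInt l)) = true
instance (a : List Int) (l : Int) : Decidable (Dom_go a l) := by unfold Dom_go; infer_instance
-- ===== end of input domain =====

-- B replaces A's per-transition rescan of l cells (with a shared mark array) by a
-- single pass keeping one counter of still-available flat cells; the theorem below
-- proves the two return values equal on all inputs (every access in A is guarded,
-- so A never raises and no Pre_ is needed).

-- ===== PORT A =====
-- inner loop 'for j in range(1, l+1)' of the uphill case (none = 'return False')
def goUp (a : List Int) (i : Int) (c : List Bool) : List Int → Option (List Bool)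
  | [] => some c
  | j :: js =>
    if i - j < 0 then none
    else if PySem.List.pyGetD a (i-1) 0 ≠ PySem.List.pyGetD a (i-j) 0 then none
    else if PySem.List.pyGetD c (i-j) false then none
    -- c[i-j] = True: 0 ≤ i-j (guarded above) and i-j < i < n, so .toNat is exact
    else goUp a i (c.set (i - j).toNat true) js

-- inner loop 'for j in range(l)' of the downhill case
def goDown (a : List Int) (n i : Int) (c : List Bool) : List Int → Option (List Bool)
  | [] => some c
  | j :: js =>
    if n ≤ i + j then none
    else if PySem.List.pyGetD a i 0 ≠ PySem.List.pyGetD a (i+j) 0 then none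
    else if PySem.List.pyGetD c (i+j) false then none
    -- c[i+j] = True: 0 ≤ i+j < n (guarded above), so .toNat is exact
    else goDown a n i (c.set (i + j).toNat true) js

-- outer loop 'for i in range(1, n)'
def goOuter (a : List Int) (l n : Int) : List Int → List Bool → Bool
  | [], _ => true
  | i :: is, c =>
    if PySem.List.pyGetD a (i-1) 0 ≠ PySem.List.pyGetD a i 0 then
      if |PySem.List.pyGetD a (i-1) 0 - PySem.List.pyGetD a i 0| ≠ 1 then false
      else if PySem.List.pyGetD a (i-1) 0 < PySem.List.pyGetD a i 0 then
        match goUp a i c (PySem.List.pyRange 1 (l+1) 1) with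
        | none => false
        | some c' => goOuter a l n is c'
      else
        match goDown a n i c (PySem.List.pyRange 0 l 1) with
        | none => false
        | some c' => goOuter a l n is c'
    else goOuter a l n is c

def go (a : List Int) (l : Int) : Bool :=
  goOuter a l (a.length : Int) (PySem.List.pyRange 1 (a.length : Int) 1) (List.replicate a.length false)

-- ===== PORT B =====
-- 'for x in a[1:]' carrying the state (prev, run)
def goAltLoop (l : Int) : Int → Int → List Int → Bool
  | _, run, [] => decide (0 ≤ run)
  | prev, run, x :: xs =>
    if x - prev = 0 then goAltLoop l x (run + 1) xs
    else if x - prev = 1 then (if run < l then false else goAltLoop l x 1 xs)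
    else if x - prev = -1 then (if run < 0 then false else goAltLoop l x (1 - l) xs)
    else false

def go_alt (a : List Int) (l : Int) : Bool :=
  match a with
  | [] => true
  | x :: xs => goAltLoop l x 1 xs

-- ===== PRECONDITION & SPEC =====
def Spec_go (a : List Int) (l : Int) (out : Bool) : Prop := out = go_alt a l
instance (a : List Int) (l : Int) (out : Bool) : Decidable (Spec_go a l out) := by unfold Spec_go; infer_instance

-- ===== CLAIM (what is proved, stated in full; the proofs are below) =====
def Claim_equal_go : Prop := ∀ (a : List Int) (l : Int), Dom_go a l → Spec_go a l (go a l)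

-- ===== LEMMAS AND PROOFS =====

-- getD after set, totally
theorem pvGetD_set (c : List Bool) (i k : Nat) (v : Bool) :
    (c.set i v).getD k false = if i = k ∧ k < c.length then v else c.getD k false := by
  simp only [List.getD_eq_getElem?_getD, List.getElem?_set]
  split_ifs with h1 h2 h3 h3 <;> simp_all

-- getD through drop
theorem pvGetD_drop (a : List Int) (q k : Nat) :
    (a.drop q).getD k 0 = a.getD (q + k) 0 := by
  simp [List.getD_eq_getElem?_getD, List.getElem?_drop]

-- number of leading elements of xs equal to v
def leadCount (v : Int) : List Int → Int
  | [] => 0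
  | x :: xs => if x = v then 1 + leadCount v xs else 0

theorem leadCount_nonneg (v : Int) : ∀ xs : List Int, 0 ≤ leadCount v xs := by
  intro xs
  induction xs with
  | nil => simp [leadCount]
  | cons x xs ih => simp only [leadCount]; split_ifs <;> omega

theorem leadCount_spec (v : Int) : ∀ (xs : List Int) (t : Nat),
    ((t:Int) ≤ leadCount v xs ↔ (t ≤ xs.length ∧ ∀ k : Nat, k < t → xs.getD k 0 = v)) := by
  intro xs
  induction xs with
  | nil =>
    intro t
    simp only [leadCount, List.length_nil]
    constructor
    · intro h
      have ht : t = 0 := by omega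
      subst ht
      exact ⟨Nat.le_refl 0, fun k hk => absurd hk (Nat.not_lt_zero k)⟩
    · rintro ⟨h, -⟩
      have ht : t = 0 := by omega
      simp [ht]
  | cons x xs ih =>
    intro t
    by_cases hx : x = v
    · simp only [leadCount, if_pos hx, List.length_cons]
      cases t with
      | zero =>
        have := leadCount_nonneg v xs
        constructor
        · intro _
          exact ⟨Nat.zero_le _, fun k hk => absurd hk (Nat.not_lt_zero k)⟩
        · intro _
          omega
      | succ t' =>
        constructor
        · intro h
          have h' : (t':Int) ≤ leadCount v xs := by push_cast at h; omega
          obtain ⟨h1, h2⟩ := (ih t').mp h'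
          refine ⟨by omega, ?_⟩
          intro k hk
          cases k with
          | zero => simpa using hx
          | succ k' => simpa using h2 k' (by omega)
        · rintro ⟨h1, h2⟩
          have h2' : ∀ k, k < t' → xs.getD k 0 = v := by
            intro k hk
            simpa using h2 (k+1) (by omega)
          have := (ih t').mpr ⟨by omega, h2'⟩
          push_cast
          omega
    · simp only [leadCount, if_neg hx, List.length_cons]
      constructor
      · intro h
        have ht : t = 0 := by omega
        subst ht
        exact ⟨Nat.zero_le _, fun k hk => absurd hk (Nat.not_lt_zero k)⟩
      · rintro ⟨h1, h2⟩
        by_contra hc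
        have ht : 1 ≤ t := by omega
        have h0 := h2 0 (by omega)
        simp at h0
        exact hx h0

-- once the counter owes more cells than the flat run ahead provides, B returns False
theorem altDoomed (l : Int) (hl : 1 ≤ l) : ∀ (xs : List Int) (prev run : Int),
    run + leadCount prev xs < 0 → goAltLoop l prev run xs = false := by
  intro xs
  induction xs with
  | nil =>
    intro prev run h
    simp only [leadCount] at h
    simp only [goAltLoop]
    simp
    omega
  | cons x xs ih =>
    intro prev run h
    simp only [goAltLoop]
    by_cases hx : x = prev
    · simp only [leadCount, if_pos hx] at h
      rw [if_pos (by omega : x - prev = 0)]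
      apply ih
      rw [hx]
      omega
    · simp only [leadCount, if_neg hx] at h
      have hr : run < 0 := by omega
      rw [if_neg (by intro hd; exact hx (by omega))]
      split_ifs with h1 h2 h3 <;> first | rfl | omega

theorem goUp_preserve (a : List Int) (i : Int) : ∀ (js : List Int) (c c' : List Bool),
    (∀ j ∈ js, 1 ≤ j) → goUp a i c js = some c' →
    c'.length = c.length ∧ ∀ k : Nat, i ≤ (k:Int) → c'.getD k false = c.getD k false := by
  intro js
  induction js with
  | nil =>
    intro c c' _ h
    simp only [goUp, Option.some.injEq] at h
    subst h
    exact ⟨rfl, fun _ _ => rfl⟩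
  | cons j js ih =>
    intro c c' hj h
    simp only [goUp] at h
    split_ifs at h with h1 h2 h3
    obtain ⟨hlen, hk⟩ := ih _ c' (fun x hx => hj x (List.mem_cons_of_mem _ hx)) h
    refine ⟨by rw [hlen, List.length_set], ?_⟩
    intro k hk2
    rw [hk k hk2, pvGetD_set]
    rw [if_neg ?_]
    rintro ⟨he, -⟩
    have hij : ((i-j).toNat : Int) = i - j := Int.toNat_of_nonneg (by omega)
    have hj1 : 1 ≤ j := hj j (List.mem_cons_self ..)
    omega

theorem goUp_none_iff (a : List Int) (l : Int) (_hl : 1 ≤ l) (p s : Nat) (m : Int)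
    (hsp : s < p) (hpn : p ≤ a.length)
    (hsm : (s:Int) ≤ m)
    (hs0 : s = 0 ∨ a.getD (s-1) 0 ≠ a.getD s 0)
    (hrun : ∀ k : Nat, s ≤ k → k < p → a.getD k 0 = a.getD s 0) :
    ∀ (fuel : Nat) (j0 : Int) (c : List Bool), (l + 1 - j0).toNat = fuel → 1 ≤ j0 →
    m ≤ (p:Int) - j0 + 1 →
    c.length = a.length →
    (∀ k : Nat, s ≤ k → k < a.length →
        c.getD k false = decide ((k:Int) < m ∨ ((p:Int) - j0 < (k:Int) ∧ (k:Int) < (p:Int)))) →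
    ((goUp a (p:Int) c (PySem.List.pyRange j0 (l+1) 1) = none) ↔ (p:Int) - m < l) := by
  intro fuel
  induction fuel with
  | zero =>
    intro j0 c hfuel hj0 hm hcl hmark
    have hj : l + 1 ≤ j0 := by omega
    rw [PySem.List.pyRange_one_eq_nil hj]
    simp only [goUp]
    constructor
    · intro h; exact absurd h (by simp)
    · intro h; exfalso; omega
  | succ fuel ih =>
    intro j0 c hfuel hj0 hm hcl hmark
    have hjl : j0 < l + 1 := by omega
    rw [PySem.List.pyRange_one_cons hjl]
    simp only [goUp]
    by_cases hcase : m ≤ (p:Int) - j0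
    · -- the j-th check passes; recurse
      have h0 : ¬ ((p:Int) - j0 < 0) := by omega
      rw [if_neg h0]
      have hp1 : ((p:Int) - 1) = ((p - 1 : Nat) : Int) := by omega
      set k0 : Nat := ((p:Int) - j0).toNat with hk0d
      have hk0' : ((k0:Int)) = (p:Int) - j0 := Int.toNat_of_nonneg (by omega)
      have e1 : PySem.List.pyGetD a ((p:Int)-1) 0 = a.getD (p-1) 0 := by
        rw [hp1, PySem.List.pyGetD_natCast]
      have e2 : PySem.List.pyGetD a ((p:Int)-j0) 0 = a.getD k0 0 := by
        rw [← hk0', PySem.List.pyGetD_natCast]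
      have e3 : PySem.List.pyGetD c ((p:Int)-j0) false = c.getD k0 false := by
        rw [← hk0', PySem.List.pyGetD_natCast]
      have hv1 : a.getD (p-1) 0 = a.getD s 0 := hrun (p-1) (by omega) (by omega)
      have hv2 : a.getD k0 0 = a.getD s 0 := hrun k0 (by omega) (by omega)
      rw [e1, e2, if_neg (not_ne_iff.mpr (hv1.trans hv2.symm))]
      have hc3 : c.getD k0 false = false := by
        rw [hmark k0 (by omega) (by omega)]
        exact decide_eq_false (by omega)
      rw [e3, hc3, if_neg (by simp)]
      apply ih (j0+1) (c.set k0 true) (by omega) (by omega) (by omega)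
        (by rw [List.length_set, hcl])
      intro k hks hkn
      rw [pvGetD_set]
      by_cases hkk : k0 = k ∧ k < c.length
      · rw [if_pos hkk]
        obtain ⟨he, -⟩ := hkk
        subst he
        exact (decide_eq_true (by omega)).symm
      · rw [if_neg hkk, hmark k hks hkn, decide_eq_decide]
        have hkc : k < c.length := by omega
        have hne : ¬ (k0 = k) := fun h => hkk ⟨h, hkc⟩
        omega
    · -- the j-th check fails: result none, and p - m < l
      refine iff_of_true ?_ (by omega)
      by_cases h0 : (p:Int) - j0 < 0
      · rw [if_pos h0]
      · rw [if_neg h0]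
        set k0 : Nat := ((p:Int) - j0).toNat with hk0d
        have hk0' : ((k0:Int)) = (p:Int) - j0 := Int.toNat_of_nonneg (by omega)
        have hp1 : ((p:Int) - 1) = ((p - 1 : Nat) : Int) := by omega
        have e1 : PySem.List.pyGetD a ((p:Int)-1) 0 = a.getD (p-1) 0 := by
          rw [hp1, PySem.List.pyGetD_natCast]
        have e2 : PySem.List.pyGetD a ((p:Int)-j0) 0 = a.getD k0 0 := by
          rw [← hk0', PySem.List.pyGetD_natCast]
        have e3 : PySem.List.pyGetD c ((p:Int)-j0) false = c.getD k0 false := by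
          rw [← hk0', PySem.List.pyGetD_natCast]
        have hv1 : a.getD (p-1) 0 = a.getD s 0 := hrun (p-1) (by omega) (by omega)
        by_cases hks : s ≤ k0
        · -- in-run but already marked
          have hv2 : a.getD k0 0 = a.getD s 0 := hrun k0 hks (by omega)
          rw [e1, e2, if_neg (not_ne_iff.mpr (hv1.trans hv2.symm))]
          have hc3 : c.getD k0 false = true := by
            rw [hmark k0 hks (by omega)]
            exact decide_eq_true (by omega)
          rw [e3, hc3, if_pos rfl]
        · -- just below the run start: heights differ
          have hk0s : k0 = s - 1 := by omega
          have hs1 : s ≠ 0 := by omega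
          obtain hs0' := hs0.resolve_left hs1
          rw [e1, e2, if_pos ?_]
          rw [hv1, hk0s]
          exact fun h => hs0' h.symm

theorem goDown_char (a : List Int) (l : Int) (hl : 1 ≤ l) (p : Nat)
    (_hpn : p < a.length) :
    ∀ (fuel : Nat) (j0 : Int) (c : List Bool), (l - j0).toNat = fuel → 0 ≤ j0 → j0 ≤ l →
    c.length = a.length →
    (∀ k : Nat, k < a.length → (p:Int) ≤ (k:Int) → c.getD k false = decide ((k:Int) < (p:Int) + j0)) →
    (∀ k : Nat, (p:Int) ≤ (k:Int) → (k:Int) < (p:Int) + j0 → k < a.length ∧ a.getD k 0 = a.getD p 0) →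
    ( (goDown a (a.length:Int) (p:Int) c (PySem.List.pyRange j0 l 1) = none ↔
        ¬ ((p:Int) + l ≤ (a.length:Int) ∧ ∀ k : Nat, (p:Int) ≤ (k:Int) → (k:Int) < (p:Int) + l → a.getD k 0 = a.getD p 0))
      ∧ ∀ c', goDown a (a.length:Int) (p:Int) c (PySem.List.pyRange j0 l 1) = some c' →
          c'.length = a.length ∧ ∀ k : Nat, k < a.length → (p:Int) ≤ (k:Int) →
            c'.getD k false = decide ((k:Int) < (p:Int) + l) ) := by
  intro fuel
  induction fuel with
  | zero =>
    intro j0 c hfuel hj00 hj0l hcl hmark hpassed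
    have hj : j0 = l := by omega
    subst hj
    rw [PySem.List.pyRange_one_eq_nil (le_refl j0)]
    simp only [goDown]
    have hF : ((p:Int) + j0 ≤ (a.length:Int) ∧ ∀ k : Nat, (p:Int) ≤ (k:Int) → (k:Int) < (p:Int) + j0 → a.getD k 0 = a.getD p 0) := by
      constructor
      · set k0 : Nat := ((p:Int) + j0 - 1).toNat with hk0d
        have hk0' : ((k0:Int)) = (p:Int) + j0 - 1 := Int.toNat_of_nonneg (by omega)
        have := (hpassed k0 (by omega) (by omega)).1
        omega
      · intro k hk1 hk2
        exact (hpassed k hk1 hk2).2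
    constructor
    · exact iff_of_false (by simp) (not_not_intro hF)
    · intro c' hc'
      injection hc' with hc'
      subst hc'
      exact ⟨hcl, fun k hk1 hk2 => hmark k hk1 hk2⟩
  | succ fuel ih =>
    intro j0 c hfuel hj00 hj0l hcl hmark hpassed
    have hjl : j0 < l := by omega
    rw [PySem.List.pyRange_one_cons hjl]
    simp only [goDown]
    by_cases hb : (a.length:Int) ≤ (p:Int) + j0
    · rw [if_pos hb]
      refine ⟨iff_of_true rfl ?_, fun c' hc' => absurd hc' (by simp)⟩
      rintro ⟨h1, -⟩
      omega
    · rw [if_neg hb]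
      set k0 : Nat := ((p:Int) + j0).toNat with hk0d
      have hk0' : ((k0:Int)) = (p:Int) + j0 := Int.toNat_of_nonneg (by omega)
      have e1 : PySem.List.pyGetD a ((p:Int)) 0 = a.getD p 0 := PySem.List.pyGetD_natCast a p 0
      have e2 : PySem.List.pyGetD a ((p:Int)+j0) 0 = a.getD k0 0 := by
        rw [← hk0', PySem.List.pyGetD_natCast]
      have e3 : PySem.List.pyGetD c ((p:Int)+j0) false = c.getD k0 false := by
        rw [← hk0', PySem.List.pyGetD_natCast]
      by_cases heq : a.getD p 0 = a.getD k0 0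
      · rw [e1, e2, if_neg (not_ne_iff.mpr heq)]
        have hc3 : c.getD k0 false = false := by
          rw [hmark k0 (by omega) (by omega)]
          exact decide_eq_false (by omega)
        rw [e3, hc3, if_neg (by simp)]
        apply ih (j0+1) (c.set k0 true) (by omega) (by omega) (by omega)
          (by rw [List.length_set, hcl])
        · intro k hkn hkp
          rw [pvGetD_set]
          by_cases hkk : k0 = k ∧ k < c.length
          · rw [if_pos hkk]
            obtain ⟨he, -⟩ := hkk
            subst he
            exact (decide_eq_true (by omega)).symm
          · rw [if_neg hkk, hmark k hkn hkp, decide_eq_decide]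
            have hkc : k < c.length := by omega
            have hne : ¬ (k0 = k) := fun h => hkk ⟨h, hkc⟩
            omega
        · intro k hk1 hk2
          by_cases hko : (k:Int) < (p:Int) + j0
          · exact hpassed k hk1 hko
          · have hkk0 : k = k0 := by omega
            subst hkk0
            exact ⟨by omega, heq.symm⟩
      · rw [e1, e2, if_pos heq]
        refine ⟨iff_of_true rfl ?_, fun c' hc' => absurd hc' (by simp)⟩
        rintro ⟨h1, h2⟩
        exact heq (h2 k0 (by omega) (by omega)).symm

theorem mainLoop (a : List Int) (l : Int) :
    ∀ (fuel : Nat) (p s : Nat) (m : Int) (c : List Bool),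
    a.length - p = fuel → 1 ≤ p → p ≤ a.length → s < p →
    m ≤ (a.length:Int) → (1 ≤ l → (s:Int) ≤ m) → c.length = a.length →
    (∀ k : Nat, s ≤ k → k < a.length → c.getD k false = decide ((k:Int) < m)) →
    (∀ k : Nat, s ≤ k → ((k:Int) < (p:Int) ∨ (k:Int) < m) → k < a.length → a.getD k 0 = a.getD s 0) →
    (s = 0 ∨ a.getD (s-1) 0 ≠ a.getD s 0) →
    goOuter a l (a.length:Int) (PySem.List.pyRange (p:Int) (a.length:Int) 1) c
      = goAltLoop l (a.getD (p-1) 0) ((p:Int) - m) (a.drop p) := by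
  intro fuel
  induction fuel with
  | zero =>
    intro p s m c hfuel hp1 hpn hsp hmn hsm hcl hmark hrun hs0
    have hpe : p = a.length := by omega
    subst hpe
    rw [PySem.List.pyRange_one_eq_nil (le_refl _), List.drop_length]
    simp only [goOuter, goAltLoop]
    exact (decide_eq_true (by omega)).symm
  | succ fuel ih =>
    intro p s m c hfuel hp1 hpn hsp hmn hsm hcl hmark hrun hs0
    have hpl : p < a.length := by omega
    have hplI : (p:Int) < (a.length:Int) := by exact_mod_cast hpl
    rw [PySem.List.pyRange_one_cons hplI]
    have hp1' : ((p:Int) - 1) = ((p-1:Nat):Int) := by omega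
    have e1 : PySem.List.pyGetD a ((p:Int)-1) 0 = a.getD (p-1) 0 := by
      rw [hp1', PySem.List.pyGetD_natCast]
    have e2 : PySem.List.pyGetD a ((p:Int)) 0 = a.getD p 0 := PySem.List.pyGetD_natCast a p 0
    have hdrop : a.drop p = a.getD p 0 :: a.drop (p+1) := by
      rw [List.drop_eq_getElem_cons hpl, List.getD_eq_getElem a 0 hpl]
    have hcast : ((p:Int)) + 1 = (((p+1:Nat)):Int) := by omega
    simp only [goOuter, e1, e2]
    rw [hdrop]
    by_cases hpc : a.getD (p-1) 0 = a.getD p 0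
    · -- flat step
      rw [if_neg (not_ne_iff.mpr hpc)]
      simp only [goAltLoop]
      rw [if_pos (by omega : a.getD p 0 - a.getD (p-1) 0 = 0), hcast]
      have hrun' : ∀ k : Nat, s ≤ k → ((k:Int) < ((p+1:Nat):Int) ∨ (k:Int) < m) → k < a.length → a.getD k 0 = a.getD s 0 := by
        intro k hk hor hkn
        by_cases hkp : k = p
        · rw [hkp, ← hpc]
          exact hrun (p-1) (by omega) (Or.inl (by omega)) (by omega)
        · exact hrun k hk (by omega) hkn
      have hIH := ih (p+1) s m c (by omega) (by omega) (by omega) (by omega) hmn hsm hcl hmark hrun' hs0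
      rw [hIH]
      have hr1 : (((p+1:Nat)):Int) - m = ((p:Int) - m) + 1 := by omega
      rw [hr1]
      simp only [Nat.add_sub_cancel]
    · -- height transition
      rw [if_pos hpc]
      have hmp : m ≤ (p:Int) := by
        by_contra hc
        have h1 := hrun p (by omega) (Or.inr (by omega)) hpl
        have h2 := hrun (p-1) (by omega) (Or.inl (by omega)) (by omega)
        exact hpc (h2.trans h1.symm)
      simp only [goAltLoop]
      by_cases hd1 : a.getD p 0 - a.getD (p-1) 0 = 1
      · -- uphill
        have habs : ¬(|a.getD (p-1) 0 - a.getD p 0| ≠ 1) := by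
          rw [not_ne_iff, abs_eq (by norm_num : (0:Int) ≤ 1)]
          omega
        rw [if_neg habs, if_pos (by omega : a.getD (p-1) 0 < a.getD p 0)]
        rw [if_neg (by omega : ¬ (a.getD p 0 - a.getD (p-1) 0 = 0)), if_pos hd1]
        by_cases hl1 : 1 ≤ l
        · have hiff := goUp_none_iff a l hl1 p s m hsp (by omega) (hsm hl1) hs0
            (fun k hk1 hk2 => hrun k hk1 (Or.inl (by omega)) (by omega))
            (l + 1 - 1).toNat 1 c rfl (by omega) (by omega) hcl
            (fun k hk1 hk2 => by rw [hmark k hk1 hk2, decide_eq_decide]; omega)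
          by_cases hfail : (p:Int) - m < l
          · rw [if_pos hfail]
            split
            · rfl
            · next c' hgu => rw [hiff.mpr hfail] at hgu; exact absurd hgu (by simp)
          · rw [if_neg hfail, hcast]
            split
            · next hgu => exact absurd (hiff.mp hgu) hfail
            · next c' hgu =>
              obtain ⟨hlen', hpres⟩ := goUp_preserve a ((p:Int)) _ c c'
                (fun j hj => (PySem.List.mem_pyRange_one.mp hj).1) hgu
              have hIH := ih (p+1) p ((p:Int)) c' (by omega) (by omega) (by omega) (by omega)
                (by omega) (fun _ => le_refl _) (by rw [hlen', hcl])
                (by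
                  intro k hk1 hk2
                  rw [hpres k (by omega), hmark k (by omega) hk2, decide_eq_decide]
                  omega)
                (by
                  intro k hk1 hor hk2
                  have hkp : k = p := by omega
                  subst hkp
                  rfl)
                (Or.inr hpc)
              rw [hIH]
              have hr1 : (((p+1:Nat)):Int) - ((p:Int)) = 1 := by omega
              rw [hr1]
              simp only [Nat.add_sub_cancel]
        · -- l ≤ 0: the uphill inner loop is empty
          rw [PySem.List.pyRange_one_eq_nil (by omega : l + 1 ≤ 1)]
          rw [if_neg (by omega : ¬ ((p:Int) - m < l)), hcast]
          split
          · next hgu => simp [goUp] at hgu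
          · next c' hgu =>
            simp only [goUp, Option.some.injEq] at hgu
            subst hgu
            have hIH := ih (p+1) p ((p:Int)) c (by omega) (by omega) (by omega) (by omega)
              (by omega) (fun _ => le_refl _) hcl
              (by
                intro k hk1 hk2
                rw [hmark k (by omega) hk2, decide_eq_decide]
                omega)
              (by
                intro k hk1 hor hk2
                have hkp : k = p := by omega
                subst hkp
                rfl)
              (Or.inr hpc)
            rw [hIH]
            have hr1 : (((p+1:Nat)):Int) - ((p:Int)) = 1 := by omega
            rw [hr1]
            simp only [Nat.add_sub_cancel]
      · by_cases hd2 : a.getD p 0 - a.getD (p-1) 0 = -1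
        · -- downhill
          have habs : ¬(|a.getD (p-1) 0 - a.getD p 0| ≠ 1) := by
            rw [not_ne_iff, abs_eq (by norm_num : (0:Int) ≤ 1)]
            omega
          rw [if_neg habs, if_neg (by omega : ¬ (a.getD (p-1) 0 < a.getD p 0))]
          rw [if_neg (by omega : ¬ (a.getD p 0 - a.getD (p-1) 0 = 0)),
              if_neg (by omega : ¬ (a.getD p 0 - a.getD (p-1) 0 = 1)), if_pos hd2]
          rw [if_neg (by omega : ¬ ((p:Int) - m < 0))]
          by_cases hl1 : 1 ≤ l
          · obtain ⟨hnone, hsome⟩ := goDown_char a l hl1 p hpl (l - 0).toNat 0 c rfl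
              (le_refl 0) (by omega) hcl
              (by
                intro k hkn hkp
                rw [hmark k (by omega) hkn, decide_eq_decide]
                omega)
              (by
                intro k hk1 hk2
                exfalso
                omega)
            by_cases hF : ((p:Int) + l ≤ (a.length:Int) ∧ ∀ k : Nat, (p:Int) ≤ (k:Int) → (k:Int) < (p:Int) + l → a.getD k 0 = a.getD p 0)
            · rw [hcast]
              split
              · next hgd => exact absurd (hnone.mp hgd) (not_not_intro hF)
              · next c' hgd =>
                obtain ⟨hlen', hmk'⟩ := hsome c' hgd
                have hIH := ih (p+1) p ((p:Int) + l) c' (by omega) (by omega) (by omega) (by omega)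
                  (by omega) (fun _ => by omega) hlen'
                  (by
                    intro k hk1 hk2
                    exact hmk' k hk2 (by omega))
                  (by
                    intro k hk1 hor hk2
                    by_cases hkp : k = p
                    · subst hkp; rfl
                    · exact hF.2 k (by omega) (by omega))
                  (Or.inr hpc)
                rw [hIH]
                have hr1 : (((p+1:Nat)):Int) - ((p:Int) + l) = 1 - l := by omega
                rw [hr1]
                simp only [Nat.add_sub_cancel]
            · split
              · next hgd =>
                -- A fails now; B fails later: the counter goes irrecoverably negative
                have hlc : ¬ ((l-1 : Int) ≤ leadCount (a.getD p 0) (a.drop (p+1))) := by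
                  intro hge
                  have hcast2 : (((l-1).toNat : Int)) = l - 1 := Int.toNat_of_nonneg (by omega)
                  obtain ⟨hlen2, heq2⟩ := (leadCount_spec (a.getD p 0) (a.drop (p+1)) (l-1).toNat).mp
                    (by rw [hcast2]; exact hge)
                  apply hF
                  constructor
                  · rw [List.length_drop] at hlen2
                    omega
                  · intro k hk1 hk2
                    by_cases hkp : k = p
                    · subst hkp; rfl
                    · have := heq2 (k - (p+1)) (by omega)
                      rw [pvGetD_drop] at this
                      have hkk : (p+1) + (k-(p+1)) = k := by omega
                      rw [hkk] at this
                      exact this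
                exact (altDoomed l hl1 (a.drop (p+1)) (a.getD p 0) (1 - l) (by omega)).symm
              · next c' hgd => exact absurd (hnone.mpr hF) (by rw [hgd]; simp)
          · -- l ≤ 0: the downhill inner loop is empty
            rw [PySem.List.pyRange_one_eq_nil (by omega : l ≤ 0), hcast]
            split
            · next hgd => simp [goDown] at hgd
            · next c' hgd =>
              simp only [goDown, Option.some.injEq] at hgd
              subst hgd
              have hIH := ih (p+1) p ((p:Int) + l) c (by omega) (by omega) (by omega) (by omega)
                (by omega) (fun h => absurd h (by omega)) hcl
                (by
                  intro k hk1 hk2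
                  rw [hmark k (by omega) hk2, decide_eq_decide]
                  omega)
                (by
                  intro k hk1 hor hk2
                  have hkp : k = p := by omega
                  subst hkp
                  rfl)
                (Or.inr hpc)
              rw [hIH]
              have hr1 : (((p+1:Nat)):Int) - ((p:Int) + l) = 1 - l := by omega
              rw [hr1]
              simp only [Nat.add_sub_cancel]
        · -- |difference| ≥ 2: both fail at once
          have habs : |a.getD (p-1) 0 - a.getD p 0| ≠ 1 := by
            intro h
            rw [abs_eq (by norm_num : (0:Int) ≤ 1)] at h
            omega
          rw [if_pos habs]
          rw [if_neg (by omega : ¬ (a.getD p 0 - a.getD (p-1) 0 = 0)), if_neg hd1, if_neg hd2]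

theorem go_eq_alt (a : List Int) (l : Int) : go a l = go_alt a l := by
  cases a with
  | nil =>
    simp [go, go_alt, goOuter]
  | cons x xs =>
    have hm := mainLoop (x :: xs) l ((x::xs).length - 1) 1 0 0 (List.replicate (x::xs).length false)
      rfl (le_refl 1) (by simp) (by omega) (by exact_mod_cast Int.natCast_nonneg _)
      (fun _ => le_refl 0) (by simp)
      (by
        intro k hk1 hk2
        rw [List.getD_eq_getElem?_getD, List.getElem?_replicate]
        rw [if_pos hk2]
        exact (decide_eq_false (by omega)).symm)
      (by
        intro k hk1 hor hk2
        have hk0 : k = 0 := by omega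
        subst hk0
        rfl)
      (Or.inl rfl)
    simp only [Nat.cast_one, Nat.sub_self, List.getD_cons_zero, List.drop_succ_cons,
      List.drop_zero, sub_zero] at hm
    exact hm

-- ===== VERDICT (by name: the statement is the Claim_ definition above) =====
theorem go_spec : Claim_equal_go := by
  intro a l _
  unfold Spec_go
  exact go_eq_alt a l
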